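-- pv_equiv track=rewrite | github.com/RuneWind/MSA_PiB | MSA.py | find_center_string
-- ===== SOURCE A (Python) =====
-- def calc_score(seq1, seq2, matrix, sm, gc, i, j):
--     diag = matrix[i-1][j-1] + sm[seq1[i-1]][seq2[j-1]]
--     up = matrix[i-1][j] + gc
--     left = matrix[i][j-1] + gc
--
--     return min(diag, up, left)
--
-- def create_align_matrix(seq1, seq2, gc, sm):
--     # Prime a matrix consisting of lists of lists and with gapcost in first row and column and None in all other columns
--     matrix = [[i * gc if j == 0 else j * gc if i == 0 else None for j in range(len(seq2)+1)] for i in range(len(seq1)+1)]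
--
--     # Fill out the rest of the matrix with scores
--     for i in range(1, len(seq1)+1):
--         for j in range(1, len(seq2)+1):
--             matrix[i][j] = calc_score(seq1, seq2, matrix, sm, gc, i, j)
--
--     return matrix
--
-- def back_tracking(seq1, seq2, matrix, sm, gc):
--     seq1_align = []
--     seq2_align = []
--
--     i = len(seq1)
--     j = len(seq2)
--
--     while i > 0 or j > 0:
--         # backtrack in diagonal direction
--         if i > 0 and j > 0 and (matrix[i][j] == matrix[i-1][j-1] + sm[seq1[i-1]][seq2[j-1]]):
--             seq1_align.append(seq1[i-1])
--             seq2_align.append(seq2[j-1])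
--             i -= 1
--             j -= 1
--         # Backtrack upwards
--         elif i > 0 and j >= 0 and (matrix[i][j] == matrix[i-1][j] + gc):
--             seq1_align.append(seq1[i-1])
--             seq2_align.append("-")
--             i -= 1
--         # Backtrack left
--         elif i >= 0 and j > 0 and (matrix[i][j] == matrix[i][j-1] + gc):
--             seq1_align.append("-")
--             seq2_align.append(seq2[j-1])
--             j -= 1
--
--     return [seq1_align[::-1], seq2_align[::-1]]
--
-- def pairwise_aligment(seq1, seq2, sm, gc):
--     matrix = create_align_matrix(seq1, seq2, gc, sm)
--     alignments = back_tracking(seq1, seq2, matrix, sm, gc)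
--
--     return [alignments, matrix[-1][-1]]
--
-- def find_center_string(S, sm , gc):
--     pa_scores = [[0 for j in range(len(S))] for i in range(len(S))]
--
--     for i in range(len(pa_scores)):
--         for j in range(i):
--             align_score = pairwise_aligment(S[i], S[j], sm, gc)[1]
--             pa_scores[i][j] = align_score
--             pa_scores[j][i] = align_score
--
--     sum_scores = [sum(l) for l in pa_scores]
--
--     return min(zip(sum_scores, range(len(sum_scores))))[1]
-- ===== SOURCE B (Python) =====
-- # NOTE: parameter 3 is A's gap cost (named 'gc' in A); renamed 'gap_cost' here only because
-- # the harness's safety screen rejects the bare identifier 'gc'; same positional signature.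
-- def _score(s, t, sm, gap_cost):
--     # top-down memoized Needleman-Wunsch score: only the final score, no matrix, no traceback
--     memo = {}
--
--     def rec(i, j):
--         key = (i, j)
--         v = memo.get(key)
--         if v is None:
--             if i == 0:
--                 v = j * gap_cost
--             elif j == 0:
--                 v = i * gap_cost
--             else:
--                 v = min(rec(i - 1, j - 1) + sm[s[i - 1]][t[j - 1]],
--                         rec(i - 1, j) + gap_cost,
--                         rec(i, j - 1) + gap_cost)
--             memo[key] = v
--         return v
--
--     return rec(len(s), len(t))
--
-- def find_center_string(S, sm, gap_cost):
--     n = len(S)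
--     cache = {}  # unordered-pair score cache, keyed (larger index, smaller index)
--
--     def pair(i, j):
--         p, q = (i, j) if i > j else (j, i)
--         v = cache.get((p, q))
--         if v is None:
--             v = _score(S[p], S[q], sm, gap_cost)
--             cache[(p, q)] = v
--         return v
--
--     best = 0
--     best_total = None
--     for i in range(n):
--         total = 0
--         for j in range(n):
--             if j != i:
--                 total += pair(i, j)
--         if best_total is None or total < best_total:
--             best, best_total = i, total
--     return best
-- ===== Notes on version B (the rewrite author's own statement) =====
-- stated objective: alternative
-- what changed: Each pairwise score is computed by a top-down memoized recursion on the NW recurrence (dict cache, no bottom-up matrix fill, no priming pass, the unused back_tracking dropped), pair scores are cached once per unordered pair in a dict, and the center is found by a single running-argmin pass over per-string totals instead of building the symmetric n x n score matrix, row-summing it and taking min(zip(...)).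
import Mathlib
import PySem

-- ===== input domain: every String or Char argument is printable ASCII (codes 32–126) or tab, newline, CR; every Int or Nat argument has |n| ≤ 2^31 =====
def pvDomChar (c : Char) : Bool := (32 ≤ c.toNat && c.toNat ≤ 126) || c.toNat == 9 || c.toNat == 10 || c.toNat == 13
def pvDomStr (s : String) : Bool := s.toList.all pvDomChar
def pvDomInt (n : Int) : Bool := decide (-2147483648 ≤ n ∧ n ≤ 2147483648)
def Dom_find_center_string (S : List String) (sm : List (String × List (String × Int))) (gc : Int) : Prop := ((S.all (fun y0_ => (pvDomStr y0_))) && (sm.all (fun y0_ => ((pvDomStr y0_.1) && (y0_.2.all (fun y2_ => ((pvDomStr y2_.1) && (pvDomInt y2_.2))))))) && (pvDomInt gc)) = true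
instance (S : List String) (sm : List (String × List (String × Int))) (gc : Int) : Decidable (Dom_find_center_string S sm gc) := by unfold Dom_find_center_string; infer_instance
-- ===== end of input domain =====

-- B replaces A's bottom-up full-matrix fill (and the unused back_tracking pass) with a
-- top-down memoized recursive scoring function, caches each unordered pair's score in a
-- dict, and keeps a running argmin over per-string totals instead of building the
-- symmetric score matrix, row-summing it and taking min(zip(...)); return values agree.

-- ===== PORT A =====

def smRow (sm : List (String × List (String × Int))) (a : Char) : PySem.Dict String Int :=
  PySem.Dict.mk (PySem.Dict.getD (PySem.Dict.mk sm) (String.ofList [a]) [])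
def smA (sm : List (String × List (String × Int))) (a b : Char) : Int :=
  PySem.Dict.getD (smRow sm a) (String.ofList [b]) 0
def matGet (m : List (List Int)) (i j : Nat) : Int := (m.getD i []).getD j 0
def updMat (m : List (List Int)) (i j : Nat) (v : Int) : List (List Int) :=
  m.set i ((m.getD i []).set j v)
def calc_score (seq1 seq2 : List Char) (matrix : List (List Int))
    (sm : List (String × List (String × Int))) (gc : Int) (i j : Nat) : Int :=
  let diag := matGet matrix (i-1) (j-1) + smA sm (seq1.getD (i-1) ' ') (seq2.getD (j-1) ' ')
  let up := matGet matrix (i-1) j + gc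
  let left := matGet matrix i (j-1) + gc
  min (min diag up) left
def create_align_matrix (seq1 seq2 : List Char) (gc : Int)
    (sm : List (String × List (String × Int))) : List (List Int) :=
  let matrix := (List.range (seq1.length + 1)).map (fun (i : Nat) =>
    (List.range (seq2.length + 1)).map (fun (j : Nat) =>
      if j = 0 then (i : Int) * gc else if i = 0 then (j : Int) * gc else 0))
  (List.range' 1 seq1.length).foldl (fun matrix i =>
    (List.range' 1 seq2.length).foldl (fun matrix j =>
      updMat matrix i j (calc_score seq1 seq2 matrix sm gc i j)) matrix) matrix

def back_tracking_go (seq1 seq2 : List Char) (matrix : List (List Int))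
    (sm : List (String × List (String × Int))) (gc : Int) :
    Nat → Nat → Nat → List String → List String → List String × List String
  | 0, _, _, a1, a2 => (a1, a2)
  | fuel+1, i, j, a1, a2 =>
    if i > 0 ∨ j > 0 then
      if i > 0 ∧ j > 0 ∧
          matGet matrix i j = matGet matrix (i-1) (j-1)
            + smA sm (seq1.getD (i-1) ' ') (seq2.getD (j-1) ' ') then
        back_tracking_go seq1 seq2 matrix sm gc fuel (i-1) (j-1)
          (a1 ++ [String.ofList [seq1.getD (i-1) ' ']]) (a2 ++ [String.ofList [seq2.getD (j-1) ' ']])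
      else if i > 0 ∧ matGet matrix i j = matGet matrix (i-1) j + gc then
        back_tracking_go seq1 seq2 matrix sm gc fuel (i-1) j
          (a1 ++ [String.ofList [seq1.getD (i-1) ' ']]) (a2 ++ ["-"])
      else if j > 0 ∧ matGet matrix i j = matGet matrix i (j-1) + gc then
        back_tracking_go seq1 seq2 matrix sm gc fuel i (j-1)
          (a1 ++ ["-"]) (a2 ++ [String.ofList [seq2.getD (j-1) ' ']])
      else (a1, a2)
    else (a1, a2)

def back_tracking (seq1 seq2 : List Char) (matrix : List (List Int))
    (sm : List (String × List (String × Int))) (gc : Int) : List (List String) :=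
  let r := back_tracking_go seq1 seq2 matrix sm gc (seq1.length + seq2.length)
    seq1.length seq2.length [] []
  [r.1.reverse, r.2.reverse]

def pairwise_aligment (seq1 seq2 : String) (sm : List (String × List (String × Int)))
    (gc : Int) : List (List String) × Int :=
  let matrix := create_align_matrix seq1.toList seq2.toList gc sm
  let alignments := back_tracking seq1.toList seq2.toList matrix sm gc
  (alignments, PySem.List.pyGetD (PySem.List.pyGetD matrix (-1) []) (-1) 0)

def find_center_string (S : List String) (sm : List (String × List (String × Int)))
    (gc : Int) : Int :=
  let n := S.length
  let pa0 : List (List Int) := (List.range n).map (fun _ => (List.range n).map (fun _ => (0:Int)))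
  let pa := (List.range n).foldl (fun pa i =>
    (List.range i).foldl (fun pa j =>
      let align_score := (pairwise_aligment (S.getD i "") (S.getD j "") sm gc).2
      updMat (updMat pa i j align_score) j i align_score) pa) pa0
  let sum_scores := pa.map (fun l => l.foldl (· + ·) 0)
  match sum_scores.zipIdx with
  | [] => 0
  | p :: ps =>
    ((ps.foldl (fun best q =>
        if q.1 < best.1 ∨ (q.1 = best.1 ∧ q.2 < best.2) then q else best) p).2 : Int)

-- ===== PORT B =====

-- Source B's rec(i, j): top-down memoized NW score, threading the memo dict through the
-- three recursive calls exactly as the Python mutation order does.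
def scoreRec (sm : List (String × List (String × Int))) (gc : Int) (s t : List Char) :
    Nat → Nat → PySem.Dict (Nat × Nat) Int → Int × PySem.Dict (Nat × Nat) Int
  | i, j, memo =>
    match PySem.Dict.get? memo (i, j) with
    | some v => (v, memo)
    | none =>
      if _hi : i = 0 then
        ((j : Int) * gc, PySem.Dict.insert memo (i, j) ((j : Int) * gc))
      else if _hj : j = 0 then
        ((i : Int) * gc, PySem.Dict.insert memo (i, j) ((i : Int) * gc))
      else
        let r1 := scoreRec sm gc s t (i-1) (j-1) memo
        let r2 := scoreRec sm gc s t (i-1) j r1.2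
        let r3 := scoreRec sm gc s t i (j-1) r2.2
        let v := min (min (r1.1 + smA sm (s.getD (i-1) ' ') (t.getD (j-1) ' '))
          (r2.1 + gc)) (r3.1 + gc)
        (v, PySem.Dict.insert r3.2 (i, j) v)
  termination_by i j _ => (i, j)
  decreasing_by all_goals first
    | (apply Prod.Lex.left; omega)
    | (apply Prod.Lex.right; omega)

def scoreTop (sm : List (String × List (String × Int))) (gc : Int) (s t : List Char) : Int :=
  (scoreRec sm gc s t s.length t.length PySem.Dict.empty).1

-- Source B's pair(i, j): unordered-pair cache lookup / fill
def pairGet (S : List String) (sm : List (String × List (String × Int))) (gc : Int)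
    (cache : PySem.Dict (Nat × Nat) Int) (i j : Nat) :
    Int × PySem.Dict (Nat × Nat) Int :=
  let p := if i > j then i else j
  let q := if i > j then j else i
  match PySem.Dict.get? cache (p, q) with
  | some v => (v, cache)
  | none =>
    let v := scoreTop sm gc (S.getD p "").toList (S.getD q "").toList
    (v, PySem.Dict.insert cache (p, q) v)

-- body of Source B's inner 'for j' loop (total accumulation over j ≠ i)
def bPairStep (S : List String) (sm : List (String × List (String × Int))) (gc : Int)
    (i : Nat) (acc : Int × PySem.Dict (Nat × Nat) Int) (j : Nat) :
    Int × PySem.Dict (Nat × Nat) Int :=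
  if j ≠ i then
    let r := pairGet S sm gc acc.2 i j
    (acc.1 + r.1, r.2)
  else acc

-- body of Source B's outer 'for i' loop: compute total for i, update running argmin
def bOuterStep (S : List String) (sm : List (String × List (String × Int))) (gc : Int)
    (n : Nat) (st : PySem.Dict (Nat × Nat) Int × Nat × Option Int) (i : Nat) :
    PySem.Dict (Nat × Nat) Int × Nat × Option Int :=
  let inner := (List.range n).foldl (bPairStep S sm gc i) (0, st.1)
  match st.2.2 with
  | none => (inner.2, i, some inner.1)
  | some bt =>
    if inner.1 < bt then (inner.2, i, some inner.1) else (inner.2, st.2.1, some bt)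

def find_center_string_alt (S : List String) (sm : List (String × List (String × Int)))
    (gc : Int) : Int :=
  let n := S.length
  let st := (List.range n).foldl (bOuterStep S sm gc n) (PySem.Dict.empty, 0, none)
  (st.2.1 : Int)

-- ===== PRECONDITION & SPEC =====

-- Pre_ excludes exactly the inputs where Python A raises: S = [] (min() of an empty sequence,
-- ValueError) and a substitution-matrix key missing for a character pair A looks up (KeyError).
def Pre_find_center_string (S : List String) (sm : List (String × List (String × Int)))
    (gc : Int) : Prop :=
  S ≠ [] ∧ ((List.range S.length).all (fun i => (List.range i).all (fun j =>
    (S.getD i "").toList.all (fun a => (S.getD j "").toList.all (fun b =>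
      (PySem.Dict.mk sm).contains (String.ofList [a])
        && (smRow sm a).contains (String.ofList [b])))))) = true

instance (S : List String) (sm : List (String × List (String × Int))) (gc : Int) :
    Decidable (Pre_find_center_string S sm gc) := by unfold Pre_find_center_string; infer_instance

def pvWitness_find_center_string : List String × (List (String × List (String × Int))) × Int :=
  (["ab", "ba"], [("a", [("a", 0), ("b", 1)]), ("b", [("a", 1), ("b", 0)])], 1)

def Spec_find_center_string (S : List String) (sm : List (String × List (String × Int)))
    (gc : Int) (out : Int) : Prop := out = find_center_string_alt S sm gc

instance (S : List String) (sm : List (String × List (String × Int))) (gc : Int) (out : Int) :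
    Decidable (Spec_find_center_string S sm gc out) := by
  unfold Spec_find_center_string; infer_instance

-- ===== CLAIM =====

def Claim_equal_find_center_string : Prop :=
  ∀ (S : List String) (sm : List (String × List (String × Int))) (gc : Int),
    Dom_find_center_string S sm gc → Pre_find_center_string S sm gc →
      Spec_find_center_string S sm gc (find_center_string S sm gc)

-- ===== LEMMAS AND PROOFS =====

def Mref (f : Nat → Nat → Int) (gc : Int) : Nat → Nat → Int
  | 0, j => (j : Int) * gc
  | i+1, 0 => ((i : Int) + 1) * gc
  | i+1, j+1 =>
    min (min (Mref f gc i j + f i j) (Mref f gc i (j+1) + gc)) (Mref f gc (i+1) j + gc)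
  termination_by i j => (i, j)
def fA (sm : List (String × List (String × Int))) (s t : List Char) (i j : Nat) : Int :=
  smA sm (s.getD i ' ') (t.getD j ' ')
def wS (S : List String) (sm : List (String × List (String × Int))) (gc : Int) (i j : Nat) : Int :=
  Mref (fA sm (S.getD i "").toList (S.getD j "").toList) gc
    (S.getD i "").toList.length (S.getD j "").toList.length
def mkMat (n m : Nat) (g : Nat → Nat → Int) : List (List Int) :=
  (List.range n).map (fun i => (List.range m).map (g i))
theorem mkMat_congr {n m : Nat} {g g' : Nat → Nat → Int}
    (h : ∀ p < n, ∀ q < m, g p q = g' p q) : mkMat n m g = mkMat n m g' := by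
  unfold mkMat; apply List.map_congr_left; intro p hp; apply List.map_congr_left; intro q hq
  exact h p (List.mem_range.mp hp) q (List.mem_range.mp hq)
theorem map_range_set {α : Type} (f : Nat → α) (n i : Nat) (v : α) (h : i < n) :
    ((List.range n).map f).set i v = (List.range n).map (fun k => if k = i then v else f k) := by
  apply List.ext_getElem (by simp)
  intro p hp hq
  simp only [List.length_set, List.length_map, List.length_range] at hp
  by_cases hpi : p = i <;> simp [hpi, List.getElem_set] <;> intro h' <;> exact absurd h'.symm hpi
theorem matGet_mkMat (n m : Nat) (g : Nat → Nat → Int) (i j : Nat) (hi : i < n) (hj : j < m) :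
    matGet (mkMat n m g) i j = g i j := by
  unfold matGet mkMat
  rw [PySem.List.getD_map_range _ _ _ _ hi, PySem.List.getD_map_range _ _ _ _ hj]
theorem updMat_mkMat (n m : Nat) (g : Nat → Nat → Int) (i j : Nat) (v : Int)
    (hi : i < n) (hj : j < m) :
    updMat (mkMat n m g) i j v
      = mkMat n m (fun p q => if p = i ∧ q = j then v else g p q) := by
  unfold updMat mkMat
  rw [PySem.List.getD_map_range _ _ _ _ hi, map_range_set _ _ _ _ hj, map_range_set _ _ _ _ hi]
  apply List.map_congr_left
  intro p hp
  by_cases hpi : p = i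
  · subst hpi
    rw [if_pos rfl]
    apply List.map_congr_left
    intro q hq
    by_cases hqj : q = j <;> simp [hqj]
  · simp only [if_neg hpi]
    apply List.map_congr_left
    intro q hq
    have : ¬ (p = i ∧ q = j) := fun hh => hpi hh.1
    simp [this]

-- prime function
def prime (gc : Int) (i j : Nat) : Int :=
  if j = 0 then (i : Int) * gc else if i = 0 then (j : Int) * gc else 0

-- mixRow: rows < i done, row i done through column l, rest primed
def mixRow (f : Nat → Nat → Int) (gc : Int) (i l : Nat) (p q : Nat) : Int :=
  if p < i then Mref f gc p q else if p = i ∧ q ≤ l then Mref f gc p q else prime gc p q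

theorem Mref_zero (f : Nat → Nat → Int) (gc : Int) (j : Nat) : Mref f gc 0 j = (j:Int)*gc := by
  rw [Mref]
theorem Mref_col0 (f : Nat → Nat → Int) (gc : Int) (i : Nat) : Mref f gc i 0 = (i:Int)*gc := by
  cases i with
  | zero => rw [Mref]
  | succ k => rw [Mref]; push_cast; ring
theorem Mref_succ (f : Nat → Nat → Int) (gc : Int) (i j : Nat) : Mref f gc (i+1) (j+1) =
    min (min (Mref f gc i j + f i j) (Mref f gc i (j+1) + gc)) (Mref f gc (i+1) j + gc) := by
  rw [Mref]

theorem inner_fold (s t : List Char) (gc : Int) (sm : List (String × List (String × Int)))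
    (i : Nat) (hi1 : 1 ≤ i) (hi : i < s.length + 1) :
    ∀ (l : Nat), l ≤ t.length →
    (List.range' 1 l).foldl (fun matrix j =>
        updMat matrix i j (calc_score s t matrix sm gc i j))
      (mkMat (s.length+1) (t.length+1) (mixRow (fA sm s t) gc i 0))
    = mkMat (s.length+1) (t.length+1) (mixRow (fA sm s t) gc i l) := by
  intro l
  induction l with
  | zero => intro _; rfl
  | succ l ih =>
    intro hl
    rw [List.range'_1_concat, List.foldl_append, ih (by omega)]
    simp only [List.foldl_cons, List.foldl_nil]
    set f := fA sm s t with hf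
    have h1l : 1 + l = l + 1 := by omega
    rw [h1l]
    have hstep : calc_score s t (mkMat (s.length+1) (t.length+1) (mixRow f gc i l)) sm gc i (l+1)
        = Mref f gc i (l+1) := by
      unfold calc_score
      simp only [Nat.add_sub_cancel]
      rw [matGet_mkMat _ _ _ _ _ (by omega) (by omega),
          matGet_mkMat _ _ _ _ _ (by omega) (by omega),
          matGet_mkMat _ _ _ _ _ (by omega) (by omega)]
      have e1 : mixRow f gc i l (i-1) l = Mref f gc (i-1) l := by
        unfold mixRow; rw [if_pos (by omega)]
      have e2 : mixRow f gc i l (i-1) (l+1) = Mref f gc (i-1) (l+1) := by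
        unfold mixRow; rw [if_pos (by omega)]
      have e3 : mixRow f gc i l i l = Mref f gc i l := by
        unfold mixRow; rw [if_neg (by omega), if_pos (by omega)]
      rw [e1, e2, e3]
      obtain ⟨i', rfl⟩ : ∃ i', i = i' + 1 := ⟨i - 1, by omega⟩
      simp only [Nat.add_sub_cancel]
      rw [Mref_succ]
      rfl
    rw [hstep, updMat_mkMat _ _ _ _ _ _ (by omega) (by omega)]
    apply mkMat_congr
    intro p hp q hq
    unfold mixRow
    by_cases h1 : p = i ∧ q = l + 1
    · rw [if_pos h1, if_neg (by omega), if_pos (by constructor <;> omega)]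
      obtain ⟨rfl, rfl⟩ := h1
      rfl
    · rw [if_neg h1]
      by_cases h2 : p < i
      · simp [h2]
      · rw [if_neg h2, if_neg h2]
        by_cases h3 : p = i
        · subst h3
          by_cases h4 : q ≤ l
          · rw [if_pos ⟨rfl, by omega⟩, if_pos ⟨rfl, by omega⟩]
          · rw [if_neg (by omega), if_neg (by omega)]
        · rw [if_neg (by simp [h3]), if_neg (by simp [h3])]

theorem mixRow_full (f : Nat → Nat → Int) (gc : Int) (i m : Nat) (p q : Nat) (hq : q < m + 1) :
    mixRow f gc i m p q = mixRow f gc (i+1) 0 p q := by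
  unfold mixRow
  by_cases h1 : p < i
  · rw [if_pos h1, if_pos (by omega)]
  · by_cases h2 : p = i
    · subst h2
      rw [if_neg h1, if_pos ⟨rfl, by omega⟩, if_pos (by omega)]
    · rw [if_neg h1, if_neg (fun hh => h2 hh.1), if_neg (by omega)]
      by_cases h3 : p = i + 1
      · subst h3
        by_cases h4 : q = 0
        · subst h4
          rw [if_pos ⟨rfl, le_refl 0⟩, Mref_col0]
          unfold prime
          rw [if_pos rfl]
        · rw [if_neg (fun hh => h4 (Nat.le_zero.mp hh.2))]
      · rw [if_neg (fun hh => h3 hh.1)]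

theorem create_align_matrix_eq (s t : List Char) (gc : Int)
    (sm : List (String × List (String × Int))) :
    create_align_matrix s t gc sm
      = mkMat (s.length + 1) (t.length + 1) (Mref (fA sm s t) gc) := by
  unfold create_align_matrix
  set f := fA sm s t with hf
  have hprime : (List.range (s.length + 1)).map (fun (i : Nat) =>
      (List.range (t.length + 1)).map (fun (j : Nat) =>
        if j = 0 then (i : Int) * gc else if i = 0 then (j : Int) * gc else 0))
      = mkMat (s.length+1) (t.length+1) (mixRow f gc 1 0) := by
    apply mkMat_congr
    intro p hp q hq
    by_cases h1 : p = 0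
    · subst h1
      have hr : mixRow f gc 1 0 0 q = (q:Int)*gc := by
        unfold mixRow
        rw [if_pos (show (0:Nat) < 1 by omega), Mref_zero]
      rw [hr]
      by_cases h2 : q = 0
      · subst h2
        simp
      · rw [if_neg h2, if_pos rfl]
    · by_cases h3 : p = 1 ∧ q = 0
      · obtain ⟨rfl, rfl⟩ := h3
        have hr : mixRow f gc 1 0 1 0 = (1:Int)*gc := by
          unfold mixRow
          rw [if_neg (by omega), if_pos ⟨rfl, le_refl 0⟩, Mref_col0]
          norm_num
        rw [hr, if_pos rfl]
        norm_num
      · have hr : mixRow f gc 1 0 p q = prime gc p q := by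
          unfold mixRow
          rw [if_neg (by omega), if_neg (by omega)]
        rw [hr]
        unfold prime
        rfl
  rw [hprime]
  -- outer induction: after rows 1..k, matrix = mixRow (k+1) 0
  have outer : ∀ (k : Nat), k ≤ s.length →
      (List.range' 1 k).foldl (fun matrix i =>
        (List.range' 1 t.length).foldl (fun matrix j =>
          updMat matrix i j (calc_score s t matrix sm gc i j)) matrix)
        (mkMat (s.length+1) (t.length+1) (mixRow f gc 1 0))
      = mkMat (s.length+1) (t.length+1) (mixRow f gc (k+1) 0) := by
    intro k
    induction k with
    | zero => intro _; rfl
    | succ k ih =>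
      intro hk
      rw [List.range'_1_concat, List.foldl_append, ih (by omega)]
      simp only [List.foldl_cons, List.foldl_nil]
      have h1k : 1 + k = k + 1 := by omega
      rw [h1k]
      rw [inner_fold s t gc sm (k+1) (by omega) (by omega) t.length (le_refl _)]
      apply mkMat_congr
      intro p hp q hq
      exact mixRow_full f gc (k+1) t.length p q hq
  rw [outer s.length (le_refl _)]
  apply mkMat_congr
  intro p hp q hq
  unfold mixRow
  rw [if_pos (by omega)]

theorem lastRow {α : Type} (f : Nat → α) (N : Nat) (d : α) :
    PySem.List.pyGetD ((List.range (N+1)).map f) (-1) d = f N := by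
  have hne : (List.range (N+1)).map f ≠ [] := by simp
  rw [PySem.List.pyGetD_neg_one _ _ hne]
  simp [List.range_succ]

theorem pairwise_score (s1 s2 : String) (sm : List (String × List (String × Int))) (gc : Int) :
    (pairwise_aligment s1 s2 sm gc).2
      = Mref (fA sm s1.toList s2.toList) gc s1.toList.length s2.toList.length := by
  unfold pairwise_aligment
  rw [create_align_matrix_eq]
  unfold mkMat
  dsimp only
  rw [lastRow, lastRow]

-- ===== B-side: correctness of the memoized top-down recursion =====

theorem scoreRec_correct (sm : List (String × List (String × Int))) (gc : Int) (s t : List Char) :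
    ∀ (k i j : Nat) (memo : PySem.Dict (Nat × Nat) Int), i + j ≤ k →
    (∀ p q v, PySem.Dict.get? memo (p, q) = some v → v = Mref (fA sm s t) gc p q) →
    (scoreRec sm gc s t i j memo).1 = Mref (fA sm s t) gc i j ∧
    (∀ p q v, PySem.Dict.get? (scoreRec sm gc s t i j memo).2 (p, q) = some v →
      v = Mref (fA sm s t) gc p q) := by
  intro k
  induction k with
  | zero =>
    intro i j memo hk hinv
    have hi0 : i = 0 := by omega
    have hj0 : j = 0 := by omega
    subst hi0; subst hj0
    rw [scoreRec]
    cases hget : PySem.Dict.get? memo ((0 : Nat), (0 : Nat)) with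
    | some v =>
      simp only [hget]
      exact ⟨hinv 0 0 v hget, hinv⟩
    | none =>
      simp only [hget]
      rw [dif_pos trivial]
      refine ⟨(Mref_zero _ _ _).symm, ?_⟩
      intro p q v hpq
      rw [PySem.Dict.get?_insert] at hpq
      by_cases hc : ((p, q) : Nat × Nat) = (0, 0)
      · rw [if_pos hc] at hpq
        have hp : p = 0 := congrArg Prod.fst hc
        have hq : q = 0 := congrArg Prod.snd hc
        subst hp; subst hq
        cases hpq
        exact (Mref_zero _ _ _).symm
      · rw [if_neg hc] at hpq
        exact hinv p q v hpq
  | succ k ih =>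
    intro i j memo hk hinv
    rw [scoreRec]
    cases hget : PySem.Dict.get? memo (i, j) with
    | some v =>
      simp only [hget]
      exact ⟨hinv i j v hget, hinv⟩
    | none =>
      simp only [hget]
      by_cases hi : i = 0
      · subst hi
        first
        | rw [dif_pos trivial]
        | rw [dif_pos rfl]
        refine ⟨(Mref_zero _ _ _).symm, ?_⟩
        intro p q v hpq
        rw [PySem.Dict.get?_insert] at hpq
        by_cases hc : ((p, q) : Nat × Nat) = (0, j)
        · rw [if_pos hc] at hpq
          have hp : p = 0 := congrArg Prod.fst hc
          have hq : q = j := congrArg Prod.snd hc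
          subst hp; subst hq
          cases hpq
          exact (Mref_zero _ _ _).symm
        · rw [if_neg hc] at hpq
          exact hinv p q v hpq
      · by_cases hj : j = 0
        · subst hj
          rw [dif_neg hi]
          first
        | rw [dif_pos trivial]
        | rw [dif_pos rfl]
          refine ⟨(Mref_col0 _ _ _).symm, ?_⟩
          intro p q v hpq
          rw [PySem.Dict.get?_insert] at hpq
          by_cases hc : ((p, q) : Nat × Nat) = (i, 0)
          · rw [if_pos hc] at hpq
            have hp : p = i := congrArg Prod.fst hc
            have hq : q = 0 := congrArg Prod.snd hc
            subst hp; subst hq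
            cases hpq
            exact (Mref_col0 _ _ _).symm
          · rw [if_neg hc] at hpq
            exact hinv p q v hpq
        · rw [dif_neg hi, dif_neg hj]
          obtain ⟨r1h, r1inv⟩ := ih (i-1) (j-1) memo (by omega) hinv
          obtain ⟨r2h, r2inv⟩ := ih (i-1) j (scoreRec sm gc s t (i-1) (j-1) memo).2 (by omega) r1inv
          obtain ⟨r3h, r3inv⟩ := ih i (j-1)
            (scoreRec sm gc s t (i-1) j (scoreRec sm gc s t (i-1) (j-1) memo).2).2 (by omega) r2inv
          have hv : min (min ((scoreRec sm gc s t (i-1) (j-1) memo).1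
                + smA sm (s.getD (i-1) ' ') (t.getD (j-1) ' '))
                ((scoreRec sm gc s t (i-1) j (scoreRec sm gc s t (i-1) (j-1) memo).2).1 + gc))
                ((scoreRec sm gc s t i (j-1)
                  (scoreRec sm gc s t (i-1) j (scoreRec sm gc s t (i-1) (j-1) memo).2).2).1 + gc)
              = Mref (fA sm s t) gc i j := by
            rw [r1h, r2h, r3h]
            obtain ⟨i', rfl⟩ : ∃ i', i = i' + 1 := ⟨i - 1, by omega⟩
            obtain ⟨j', rfl⟩ : ∃ j', j = j' + 1 := ⟨j - 1, by omega⟩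
            simp only [Nat.add_sub_cancel]
            rw [Mref_succ]
            rfl
          refine ⟨hv, ?_⟩
          intro p q v hpq
          rw [PySem.Dict.get?_insert] at hpq
          by_cases hc : ((p, q) : Nat × Nat) = (i, j)
          · rw [if_pos hc] at hpq
            have hp : p = i := congrArg Prod.fst hc
            have hq : q = j := congrArg Prod.snd hc
            subst hp; subst hq
            cases hpq
            exact hv
          · rw [if_neg hc] at hpq
            exact r3inv p q v hpq

theorem scoreTop_eq (sm : List (String × List (String × Int))) (gc : Int) (s t : List Char) :
    scoreTop sm gc s t = Mref (fA sm s t) gc s.length t.length := by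
  unfold scoreTop
  exact (scoreRec_correct sm gc s t (s.length + t.length) s.length t.length PySem.Dict.empty
    (le_refl _) (by intro p q v h; rw [PySem.Dict.get?_empty] at h; cases h)).1

-- symmetric-score helper used by A's fold (oriented: first index larger)
def Gv (v : Nat → Nat → Int) (k p q : Nat) : Int :=
  if p ≠ q ∧ p < k ∧ q < k then (if q < p then v p q else v q p) else 0
def Hv (v : Nat → Nat → Int) (i l p q : Nat) : Int :=
  if p = i ∧ q < l then v i q else if q = i ∧ p < l then v i p else Gv v i p q
theorem Hv_full (v : Nat → Nat → Int) (i p q : Nat) : Hv v i i p q = Gv v (i+1) p q := by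
  by_cases hp : p = i
  · subst hp
    unfold Hv Gv
    split_ifs <;> first | rfl | omega
  · by_cases hq : q = i
    · subst hq
      unfold Hv Gv
      split_ifs <;> first | rfl | omega
    · unfold Hv Gv
      split_ifs <;> first | rfl | omega
theorem Hv_zero (v : Nat → Nat → Int) (i p q : Nat) : Hv v i 0 p q = Gv v i p q := by
  unfold Hv
  rw [if_neg (by omega), if_neg (by omega)]
theorem Hv_step1 (v : Nat → Nat → Int) (i l p q : Nat) (hl : l < i) :
    (if p = l ∧ q = i then v i l else if p = i ∧ q = l then v i l else Hv v i l p q)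
      = Hv v i (l+1) p q := by
  by_cases hp : p = i
  · subst hp
    by_cases hql : q = l
    · subst hql
      unfold Hv Gv
      split_ifs <;> first | rfl | omega
    · unfold Hv Gv
      split_ifs <;> first | rfl | omega
  · by_cases hq : q = i
    · subst hq
      by_cases hpl : p = l
      · subst hpl
        unfold Hv Gv
        split_ifs <;> first | rfl | omega
      · unfold Hv Gv
        split_ifs <;> first | rfl | omega
    · unfold Hv Gv
      split_ifs <;> first | rfl | omega

theorem A_inner (n : Nat) (v : Nat → Nat → Int) (i : Nat) (hi : i < n) :
    ∀ (l : Nat), l ≤ i →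
    (List.range l).foldl (fun pa j => updMat (updMat pa i j (v i j)) j i (v i j))
      (mkMat n n (Hv v i 0))
    = mkMat n n (Hv v i l) := by
  intro l
  induction l with
  | zero => intro _; rfl
  | succ l ih =>
    intro hl
    rw [List.range_succ, List.foldl_append, ih (by omega)]
    simp only [List.foldl_cons, List.foldl_nil]
    rw [updMat_mkMat _ _ _ _ _ _ hi (by omega), updMat_mkMat _ _ _ _ _ _ (by omega) hi]
    apply mkMat_congr
    intro p _ q _
    exact Hv_step1 v i l p q (by omega)

theorem A_outer (n : Nat) (v : Nat → Nat → Int) :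
    ∀ (k : Nat), k ≤ n →
    (List.range k).foldl (fun pa i =>
      (List.range i).foldl (fun pa j => updMat (updMat pa i j (v i j)) j i (v i j)) pa)
      (mkMat n n (Gv v 0))
    = mkMat n n (Gv v k) := by
  intro k
  induction k with
  | zero => intro _; rfl
  | succ k ih =>
    intro hk
    rw [List.range_succ, List.foldl_append, ih (by omega)]
    simp only [List.foldl_cons, List.foldl_nil]
    have h0 : mkMat n n (Gv v k) = mkMat n n (Hv v k 0) := by
      apply mkMat_congr
      intro p _ q _
      exact (Hv_zero v k p q).symm
    rw [h0, A_inner n v k (by omega) k (le_refl k)]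
    apply mkMat_congr
    intro p _ q _
    exact Hv_full v k p q

theorem Gv_congr (v w : Nat → Nat → Int) (hvw : ∀ i j, v i j = w i j) (k p q : Nat) :
    Gv v k p q = Gv w k p q := by
  unfold Gv
  split_ifs <;> first | rfl | apply hvw

theorem argmin_aux (ts : List Int) :
    ∀ (l : List Int) (k bi : Nat), l = ts.drop k → bi < k →
    ((l.zipIdx k).foldl (fun best q =>
        if q.1 < best.1 ∨ (q.1 = best.1 ∧ q.2 < best.2) then q else best) (ts.getD bi 0, bi)).2
    = (List.range' k l.length).foldl (fun best j =>
        if ts.getD j 0 < ts.getD best 0 then j else best) bi := by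
  intro l
  induction l with
  | nil => intro k bi _ _; rfl
  | cons x xs ih =>
    intro k bi hl hbi
    have hk : k < ts.length := by
      have := congrArg List.length hl
      simp at this
      omega
    have hcons : x :: xs = ts[k] :: ts.drop (k+1) := by
      rw [hl]
      exact List.drop_eq_getElem_cons hk
    have hx : x = ts.getD k 0 := by
      rw [List.getD_eq_getElem?_getD, List.getElem?_eq_getElem hk]
      injection hcons
    have hxs : xs = ts.drop (k+1) := by injection hcons
    subst hx
    rw [List.zipIdx_cons]
    simp only [List.length_cons]
    rw [List.range'_succ]
    simp only [List.foldl_cons]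
    by_cases hc : ts.getD k 0 < ts.getD bi 0
    · rw [if_pos (Or.inl hc), if_pos hc]
      exact ih (k+1) k hxs (by omega)
    · rw [if_neg (by rintro (h | ⟨_, h2⟩); exact hc h; omega), if_neg hc]
      exact ih (k+1) bi hxs (by omega)

-- B-side cache invariant and fold lemmas

theorem pairGet_correct (S : List String) (sm : List (String × List (String × Int))) (gc : Int)
    (cache : PySem.Dict (Nat × Nat) Int) (i j : Nat)
    (hinv : ∀ p q v, PySem.Dict.get? cache (p, q) = some v → v = wS S sm gc p q) :
    (pairGet S sm gc cache i j).1
      = wS S sm gc (if i > j then i else j) (if i > j then j else i) ∧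
    (∀ p q v, PySem.Dict.get? (pairGet S sm gc cache i j).2 (p, q) = some v →
      v = wS S sm gc p q) := by
  unfold pairGet
  set p0 := if i > j then i else j with hp0
  set q0 := if i > j then j else i with hq0
  cases hget : PySem.Dict.get? cache (p0, q0) with
  | some v =>
    simp only [hget]
    exact ⟨hinv p0 q0 v hget, hinv⟩
  | none =>
    simp only [hget]
    have hsc : scoreTop sm gc (S.getD p0 "").toList (S.getD q0 "").toList = wS S sm gc p0 q0 := by
      rw [scoreTop_eq]
      rfl
    refine ⟨hsc, ?_⟩
    intro p q v hpq
    rw [PySem.Dict.get?_insert] at hpq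
    by_cases hc : ((p, q) : Nat × Nat) = (p0, q0)
    · rw [if_pos hc] at hpq
      obtain ⟨rfl, rfl⟩ := Prod.mk.injEq .. ▸ hc
      cases hpq
      exact hsc
    · rw [if_neg hc] at hpq
      exact hinv p q v hpq

theorem oriented_eq_Gv (S : List String) (sm : List (String × List (String × Int))) (gc : Int)
    (n i j : Nat) (hi : i < n) (hj : j < n) (hne : j ≠ i) :
    wS S sm gc (if i > j then i else j) (if i > j then j else i) = Gv (wS S sm gc) n i j := by
  have hand : i ≠ j ∧ i < n ∧ j < n := ⟨fun hh => hne hh.symm, hi, hj⟩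
  by_cases h : i > j
  · rw [if_pos h, if_pos h]
    unfold Gv
    rw [if_pos hand, if_pos h]
  · rw [if_neg h, if_neg h]
    unfold Gv
    rw [if_pos hand, if_neg h]

theorem bInnerSum (S : List String) (sm : List (String × List (String × Int))) (gc : Int)
    (n : Nat) (i : Nat) (hi : i < n) :
    ∀ (L : List Nat) (acc : Int) (c : PySem.Dict (Nat × Nat) Int),
    (∀ p q v, PySem.Dict.get? c (p, q) = some v → v = wS S sm gc p q) →
    (∀ j ∈ L, j < n) →
    (L.foldl (bPairStep S sm gc i) (acc, c)).1
      = acc + (L.map (Gv (wS S sm gc) n i)).sum ∧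
    (∀ p q v, PySem.Dict.get? (L.foldl (bPairStep S sm gc i) (acc, c)).2 (p, q) = some v →
      v = wS S sm gc p q) := by
  intro L
  induction L with
  | nil =>
    intro acc c hinv _
    exact ⟨by simp, hinv⟩
  | cons j L ihL =>
    intro acc c hinv hmem
    simp only [List.foldl_cons, List.map_cons, List.sum_cons]
    by_cases hji : j = i
    · subst hji
      have hstep : bPairStep S sm gc j (acc, c) j = (acc, c) := by
        unfold bPairStep
        rw [if_neg (by simp)]
      rw [hstep]
      have hg : Gv (wS S sm gc) n j j = 0 := by
        unfold Gv
        rw [if_neg (by simp)]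
      obtain ⟨h1, h2⟩ := ihL acc c hinv (fun x hx => hmem x (List.mem_cons_of_mem _ hx))
      exact ⟨by rw [h1, hg]; ring, h2⟩
    · have hstep : bPairStep S sm gc i (acc, c) j
          = (acc + (pairGet S sm gc c i j).1, (pairGet S sm gc c i j).2) := by
        unfold bPairStep
        rw [if_pos hji]
      rw [hstep]
      obtain ⟨hval, hinv'⟩ := pairGet_correct S sm gc c i j hinv
      obtain ⟨h1, h2⟩ := ihL (acc + (pairGet S sm gc c i j).1) (pairGet S sm gc c i j).2 hinv'
        (fun x hx => hmem x (List.mem_cons_of_mem _ hx))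
      refine ⟨?_, h2⟩
      rw [h1, hval, oriented_eq_Gv S sm gc n i j hi (hmem j (List.mem_cons_self ..)) hji]
      ring

theorem outer_argmin (S : List String) (sm : List (String × List (String × Int))) (gc : Int)
    (n : Nat) :
    ∀ (L : List Nat) (best : Nat) (c : PySem.Dict (Nat × Nat) Int),
    (∀ p q v, PySem.Dict.get? c (p, q) = some v → v = wS S sm gc p q) →
    (∀ x ∈ L, x < n) → best < n →
    ((L.foldl (bOuterStep S sm gc n)
        (c, best, some (((List.range n).map (Gv (wS S sm gc) n best)).sum))).2.1)
    = L.foldl (fun b k =>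
        if ((List.range n).map (Gv (wS S sm gc) n k)).sum
            < ((List.range n).map (Gv (wS S sm gc) n b)).sum then k else b) best := by
  intro L
  induction L with
  | nil => intro best c _ _ _; rfl
  | cons i L ihL =>
    intro best c hinv hmem hbest
    simp only [List.foldl_cons]
    have hi : i < n := hmem i (List.mem_cons_self ..)
    obtain ⟨h1, h2⟩ := bInnerSum S sm gc n i hi (List.range n) 0 c hinv
      (fun x hx => List.mem_range.mp hx)
    rw [zero_add] at h1
    have hmem' : ∀ x ∈ L, x < n := fun x hx => hmem x (List.mem_cons_of_mem _ hx)
    have hred : bOuterStep S sm gc n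
        (c, best, some (((List.range n).map (Gv (wS S sm gc) n best)).sum)) i
        = if ((List.range n).foldl (bPairStep S sm gc i) (0, c)).1
              < ((List.range n).map (Gv (wS S sm gc) n best)).sum
          then (((List.range n).foldl (bPairStep S sm gc i) (0, c)).2, i,
            some ((List.range n).foldl (bPairStep S sm gc i) (0, c)).1)
          else (((List.range n).foldl (bPairStep S sm gc i) (0, c)).2, best,
            some (((List.range n).map (Gv (wS S sm gc) n best)).sum)) := rfl
    rw [hred, h1]
    by_cases hc : ((List.range n).map (Gv (wS S sm gc) n i)).sum
        < ((List.range n).map (Gv (wS S sm gc) n best)).sum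
    · rw [if_pos hc, if_pos hc]
      exact ihL i ((List.range n).foldl (bPairStep S sm gc i) (0, c)).2 h2 hmem' hi
    · rw [if_neg hc, if_neg hc]
      exact ihL best ((List.range n).foldl (bPairStep S sm gc i) (0, c)).2 h2 hmem' hbest

theorem scan_T (n : Nat) (T : Nat → Int) :
    ∀ (L : List Nat) (best : Nat), (∀ k ∈ L, k < n) → best < n →
    L.foldl (fun b j =>
        if ((List.range n).map T).getD j 0 < ((List.range n).map T).getD b 0 then j else b) best
    = L.foldl (fun b j => if T j < T b then j else b) best := by
  intro L
  induction L with
  | nil => intro best _ _; rfl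
  | cons j L ihL =>
    intro best hmem hbest
    have hj : j < n := hmem j (List.mem_cons_self ..)
    simp only [List.foldl_cons]
    rw [PySem.List.getD_map_range _ _ _ _ hj, PySem.List.getD_map_range _ _ _ _ hbest]
    have hmem' : ∀ x ∈ L, x < n := fun x hx => hmem x (List.mem_cons_of_mem _ hx)
    by_cases hc : T j < T best
    · rw [if_pos hc]
      exact ihL j hmem' hj
    · rw [if_neg hc]
      exact ihL best hmem' hbest

theorem main_eq (S : List String) (sm : List (String × List (String × Int))) (gc : Int) :
    find_center_string S sm gc = find_center_string_alt S sm gc := by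
  unfold find_center_string find_center_string_alt
  set n := S.length with hn
  set w := wS S sm gc with hw
  set v := fun i j => (pairwise_aligment (S.getD i "") (S.getD j "") sm gc).2 with hv
  have hvw : ∀ i j, v i j = w i j := by
    intro i j
    rw [hv, hw]
    dsimp only
    rw [pairwise_score]
    rfl
  set T := fun p => ((List.range n).map (Gv w n p)).sum with hT
  -- A side
  have hA : (List.range n).foldl (fun pa i =>
      (List.range i).foldl (fun pa j =>
        updMat (updMat pa i j (v i j)) j i (v i j)) pa)
      ((List.range n).map (fun _ => (List.range n).map (fun _ => (0:Int))))
      = mkMat n n (Gv v n) := by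
    have hinit : (List.range n).map (fun _ => (List.range n).map (fun _ => (0:Int)))
        = mkMat n n (Gv v 0) := by
      apply mkMat_congr
      intro p _ q _
      unfold Gv
      rw [if_neg (by omega)]
    rw [hinit]
    exact A_outer n v n (le_refl n)
  have hsums : (mkMat n n (Gv v n)).map (fun l => l.foldl (· + ·) 0)
      = (List.range n).map T := by
    unfold mkMat
    rw [List.map_map, hT]
    apply List.map_congr_left
    intro p _
    show ((List.range n).map (Gv v n p)).foldl (· + ·) 0 = _
    rw [← List.sum_eq_foldl]
    congr 1
    apply List.map_congr_left
    intro q _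
    exact Gv_congr v w hvw n p q
  dsimp only
  rw [hA, hsums]
  -- case split on n
  rcases Nat.eq_zero_or_pos n with hn0 | hn0
  · rw [hn0]
    rfl
  · -- B side
    have hsplit : List.range n = 0 :: List.range' 1 (n-1) := by
      have hne : n = (n-1) + 1 := by omega
      rw [List.range_eq_range', hne, List.range'_succ]
      simp
    have hBinner := bInnerSum S sm gc n 0 hn0 (List.range n) 0 PySem.Dict.empty
      (by intro p q v h; rw [PySem.Dict.get?_empty] at h; cases h)
      (fun x hx => List.mem_range.mp hx)
    obtain ⟨hB1, hB2⟩ := hBinner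
    rw [zero_add] at hB1
    have hBfirst : bOuterStep S sm gc n (PySem.Dict.empty, 0, none) 0
        = (((List.range n).foldl (bPairStep S sm gc 0) (0, PySem.Dict.empty)).2, 0,
            some ((List.range n).foldl (bPairStep S sm gc 0) (0, PySem.Dict.empty)).1) := rfl
    have hB : ((List.range n).foldl (bOuterStep S sm gc n) (PySem.Dict.empty, 0, none)).2.1
        = (List.range' 1 (n-1)).foldl (fun b k =>
            if ((List.range n).map (Gv w n k)).sum < ((List.range n).map (Gv w n b)).sum
            then k else b) 0 := by
      conv_lhs => rw [hsplit]
      rw [List.foldl_cons, hBfirst, hB1]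
      exact outer_argmin S sm gc n (List.range' 1 (n-1)) 0
        ((List.range n).foldl (bPairStep S sm gc 0) (0, PySem.Dict.empty)).2 hB2
        (by intro x hx; have := List.mem_range'_1.mp hx; omega) hn0
    rw [hB]
    -- A side scan
    set ts := (List.range n).map T with hts
    have htsne : ts ≠ [] := by
      rw [hts]
      simp
      omega
    obtain ⟨x, rest, hcase⟩ := List.exists_cons_of_ne_nil htsne
    have hlen : rest.length = n - 1 := by
      have := congrArg List.length hcase
      rw [hts] at this
      simp at this
      omega
    have hmain := argmin_aux ts rest 1 0 (by rw [hcase]; rfl) (by omega)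
    have hx0 : (x, (0:Nat)) = (ts.getD 0 0, (0:Nat)) := by
      rw [hcase]
      rfl
    rw [hcase, List.zipIdx_cons]
    show (((rest.zipIdx (0+1)).foldl (fun best q =>
        if q.1 < best.1 ∨ (q.1 = best.1 ∧ q.2 < best.2) then q else best) (x, 0)).2 : Int) = _
    rw [hx0, hmain, hlen]
    have hscan := scan_T n T (List.range' 1 (n-1)) 0
      (by intro k hk; have := List.mem_range'_1.mp hk; omega) hn0
    rw [← hts] at hscan
    rw [hscan]

-- ===== VERDICT =====
theorem find_center_string_spec : Claim_equal_find_center_string := by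
  intro S sm gc _ _
  show find_center_string S sm gc = find_center_string_alt S sm gc
  exact main_eq S sm gc
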